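-- pv_equiv track=rewrite | github.com/likith1302/Leetcode | 3860-resulting-string-after-adjacent-removals/resulting-string-after-adjacent-removals.py | resultingString
-- ===== SOURCE A (Python) =====
-- def resultingString(s: str) -> str:
--     i=0
--     while i<len(s)-1:
--         r=ord(s[i])-ord(s[i+1])
--         if abs(r)== 1 or abs(r)==25:
--             s=s[:i]+s[i+2:]
--             i=max(i-1,0)
--         else:
--             i+=1
--     return s
-- ===== SOURCE B (Python) =====
-- def resultingString(s: str) -> str:
--     stack = []
--     for c in s:
--         if stack and abs(ord(stack[-1]) - ord(c)) in (1, 25):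
--             stack.pop()
--         else:
--             stack.append(c)
--     return ''.join(stack)
-- ===== Notes on version B (the rewrite author's own statement) =====
-- stated objective: faster
-- what changed: Replaced the repeated string-slicing scan with backtracking index by a single left-to-right pass over a stack that pops when the top forms a removable pair.
import Mathlib
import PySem

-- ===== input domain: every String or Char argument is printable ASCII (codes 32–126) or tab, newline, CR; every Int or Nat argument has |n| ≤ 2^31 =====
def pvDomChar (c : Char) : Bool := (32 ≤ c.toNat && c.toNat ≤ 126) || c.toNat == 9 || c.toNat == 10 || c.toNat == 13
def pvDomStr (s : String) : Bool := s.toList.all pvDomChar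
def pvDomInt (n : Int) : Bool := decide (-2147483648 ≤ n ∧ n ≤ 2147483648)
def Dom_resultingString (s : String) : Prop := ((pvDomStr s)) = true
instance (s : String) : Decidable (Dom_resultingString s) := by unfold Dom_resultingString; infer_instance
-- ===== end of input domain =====

-- B replaces A's quadratic rescan with repeated string slicing by a single pass over a stack (equal return values proved below).

-- removable-pair test: abs(ord(x) - ord(y)) == 1 or == 25 (shared by both ports)
def pvRem (x y : Char) : Bool :=
  ((x.toNat : Int) - (y.toNat : Int)).natAbs = 1 ∨ ((x.toNat : Int) - (y.toNat : Int)).natAbs = 25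

-- ===== PORT A =====
-- A's while loop: i and the shrinking string are the loop state; fuel = 2*len(s)+1 bounds the
-- number of iterations (each step decreases 2*len(s)-i) and only makes the recursion structural.
def pvLoopA (fuel : Nat) (s : List Char) (i : Nat) : List Char :=
  match fuel with
  | 0 => s
  | fuel + 1 =>
    if i < s.length - 1 then
      match PySem.List.pyGet? s (i : Int), PySem.List.pyGet? s ((i : Int) + 1) with
      | some a, some b =>
        if pvRem a b then
          pvLoopA fuel (PySem.List.slice s none (some (i : Int)) ++ PySem.List.slice s (some ((i : Int) + 2)) none) (i - 1)
        else
          pvLoopA fuel s (i + 1)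
      | _, _ => s  -- unreachable: both indices are in range under the guard
    else s

def resultingString (s : String) : String := String.ofList (pvLoopA (2 * s.toList.length + 1) s.toList 0)

-- ===== PORT B =====
-- B's stack step: pop when the top forms a removable pair with c, else push.
def pvStepB (st : List Char) (c : Char) : List Char :=
  match st with
  | t :: rest => if pvRem t c then rest else c :: t :: rest
  | [] => [c]

def resultingString_alt (s : String) : String :=
  String.ofList ((s.toList.foldl pvStepB []).reverse)

-- ===== PRECONDITION & SPEC =====
def Spec_resultingString (s : String) (out : String) : Prop := out = resultingString_alt s
instance (s : String) (out : String) : Decidable (Spec_resultingString s out) := by unfold Spec_resultingString; infer_instance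

-- ===== CLAIM (what is proved, stated in full; the proofs are below) =====
def Claim_equal_resultingString : Prop := ∀ (s : String), Dom_resultingString s → Spec_resultingString s (resultingString s)

-- ===== LEMMAS AND PROOFS =====

-- invariant: no removable adjacent pair among the first k positions of s
def pvIrr (s : List Char) (k : Nat) : Prop :=
  ∀ j, j + 1 < k → j + 1 < s.length → pvRem (s.getD j 'a') (s.getD (j + 1) 'a') = false

lemma pvIrr_mono {s : List Char} {k k' : Nat} (h : k' ≤ k) (hk : pvIrr s k) : pvIrr s k' :=
  fun j hj hl => hk j (lt_of_lt_of_le hj h) hl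

-- pushing s[i] onto the stack that holds (take i s) reversed, under the invariant
lemma pvPush (s : List Char) (i : Nat) (hi : i < s.length) (hInv : pvIrr s (i + 1)) :
    pvStepB ((s.take i).reverse) (s.getD i 'a') = (s.take (i + 1)).reverse := by
  have htake : s.take (i + 1) = s.take i ++ [s.getD i 'a'] := by
    rw [List.take_succ, List.getElem?_eq_getElem hi, List.getD_eq_getElem s 'a' hi]
    simp
  cases hrev : (s.take i).reverse with
  | nil =>
    have h0 : s.take i = [] := by simpa using hrev
    have hi0 : i = 0 := by
      rcases List.take_eq_nil_iff.mp h0 with h | h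
      · exact h
      · subst h; simp at hi
    subst hi0
    simp [pvStepB, htake]
  | cons t rest =>
    have hne : s.take i ≠ [] := by
      intro hc; rw [hc] at hrev; simp at hrev
    have hipos : 0 < i := by
      by_contra hc
      have : i = 0 := by omega
      simp [this] at hne
    -- t is the last element of take i s, i.e. s.getD (i-1) 'a'
    have hlen : (s.take i).length = i := by simp; omega
    have hteq : t = s.getD (i - 1) 'a' := by
      have h1 : s.take i = (t :: rest).reverse := by
        rw [← hrev, List.reverse_reverse]
      have h2 : (s.take i).getD ((s.take i).length - 1) 'a' = t := by
        rw [h1]; simp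
      have hi1 : i - 1 < i := by omega
      have h3 : (s.take i).getD (i - 1) 'a' = s.getD (i - 1) 'a' := by
        rw [List.getD_eq_getElem (s.take i) 'a' (by omega : i - 1 < (s.take i).length),
            List.getElem_take, List.getD_eq_getElem s 'a' (by omega)]
      rw [hlen] at h2
      rw [← h3, h2]
    have hnr : pvRem t (s.getD i 'a') = false := by
      rw [hteq]
      have := hInv (i - 1) (by omega) (by omega)
      have hidx : i - 1 + 1 = i := by omega
      rwa [hidx] at this
    simp only [pvStepB, hnr, Bool.false_eq_true, if_false]
    rw [htake, List.reverse_append, ← hrev]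
    simp

lemma pvDropCons (s : List Char) (i : Nat) (hi : i < s.length) :
    s.drop i = s.getD i 'a' :: s.drop (i + 1) := by
  rw [List.drop_eq_getElem_cons hi, List.getD_eq_getElem s 'a' hi]

-- take (i+1) splits off s[i]
lemma pvTakeSucc (s : List Char) (i : Nat) (hi : i < s.length) :
    s.take (i + 1) = s.take i ++ [s.getD i 'a'] := by
  rw [List.take_succ, List.getElem?_eq_getElem hi, List.getD_eq_getElem s 'a' hi]
  simp

-- main loop lemma: A's loop state corresponds to B's stack state (fuel bounds the iteration count)
lemma pvKey : ∀ (fuel : Nat) (s : List Char) (i : Nat), 2 * s.length - i < fuel → pvIrr s (i + 1) →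
    pvLoopA fuel s i = (List.foldl pvStepB ((s.take i).reverse) (s.drop i)).reverse := by
  intro fuel
  induction fuel with
  | zero => intro s i hfuel _; exact absurd hfuel (by omega)
  | succ fuel ih =>
    intro s i hfuel hInv
    by_cases h : i < s.length - 1
    · have hi1 : i + 1 < s.length := by omega
      have hi : i < s.length := by omega
      have hx : PySem.List.pyGet? s (i : Int) = some (s.getD i 'a') := by
        rw [PySem.List.pyGet?_natCast, List.getElem?_eq_getElem hi, List.getD_eq_getElem s 'a' hi]
      have hy : PySem.List.pyGet? s ((i : Int) + 1) = some (s.getD (i + 1) 'a') := by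
        rw [show ((i : Int) + 1) = ((i + 1 : Nat) : Int) by push_cast; ring,
            PySem.List.pyGet?_natCast, List.getElem?_eq_getElem hi1, List.getD_eq_getElem s 'a' hi1]
      have hs' : PySem.List.slice s none (some (i : Int)) ++ PySem.List.slice s (some ((i : Int) + 2)) none
          = s.take i ++ s.drop (i + 2) := by
        rw [show ((i : Int) + 2) = ((i + 2 : Nat) : Int) by push_cast; ring,
            PySem.List.slice_to_natCast, PySem.List.slice_from_natCast]
      have hlen' : (s.take i ++ s.drop (i + 2)).length = s.length - 2 := by simp; omega
      by_cases hr : pvRem (s.getD i 'a') (s.getD (i + 1) 'a') = true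
      · -- removable pair at (i, i+1): A deletes it and steps back; B pushes s[i] then pops it
        have hunfold : pvLoopA (fuel + 1) s i = pvLoopA fuel (s.take i ++ s.drop (i + 2)) (i - 1) := by
          rw [pvLoopA, if_pos h, hs']
          split
          next a' b' hx' hy' =>
            rw [hx] at hx'
            rw [hy] at hy'
            cases hx'
            cases hy'
            rw [if_pos hr]
          next hcatch =>
            exact (hcatch _ _ hx hy).elim
        rw [hunfold]
        have hdrop : s.drop i = s.getD i 'a' :: s.getD (i + 1) 'a' :: s.drop (i + 2) := by
          rw [pvDropCons s i hi, pvDropCons s (i + 1) hi1]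
        have hstep1 : pvStepB ((s.take i).reverse) (s.getD i 'a') = (s.take (i + 1)).reverse :=
          pvPush s i hi hInv
        have hstep2 : pvStepB ((s.take (i + 1)).reverse) (s.getD (i + 1) 'a') = (s.take i).reverse := by
          rw [pvTakeSucc s i hi, List.reverse_append]
          simp only [List.reverse_singleton, List.singleton_append, pvStepB]
          rw [if_pos hr]
        rw [hdrop]
        simp only [List.foldl_cons, hstep1, hstep2]
        cases i with
        | zero =>
          have hIrr0 : pvIrr (s.take 0 ++ s.drop 2) 1 := by intro j hj _; omega
          have hm0 : 2 * (s.take 0 ++ s.drop 2).length - 0 < fuel := by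
            rw [show (0 + 2 : Nat) = 2 from rfl] at hlen'
            rw [hlen']; omega
          rw [ih _ _ hm0 hIrr0]
          simp
        | succ k =>
          simp only [Nat.add_sub_cancel] at ⊢
          have hki : k < s.length := by omega
          have hIrr' : pvIrr (s.take (k + 1) ++ s.drop (k + 1 + 2)) (k + 1) := by
            intro j hj hjl
            have hgd : ∀ m, m < k + 1 → (s.take (k + 1) ++ s.drop (k + 1 + 2)).getD m 'a' = s.getD m 'a' := by
              intro m hm
              have hmt : m < (s.take (k + 1)).length := by simp; omega
              rw [List.getD_eq_getElem _ 'a' (by simp; omega),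
                  List.getElem_append_left hmt, List.getElem_take,
                  List.getD_eq_getElem s 'a' (by omega)]
            rw [hgd j (by omega), hgd (j + 1) hj]
            exact hInv j (by omega) (by omega)
          have hm : 2 * (s.take (k + 1) ++ s.drop (k + 1 + 2)).length - k < fuel := by
            rw [hlen']; omega
          have htk : (s.take (k + 1) ++ s.drop (k + 1 + 2)).take k = s.take k := by
            rw [List.take_append]
            simp [List.take_take]
            omega
          have hdk : (s.take (k + 1) ++ s.drop (k + 1 + 2)).drop k = s.getD k 'a' :: s.drop (k + 1 + 2) := by
            rw [List.drop_append]
            have h1 : List.drop k (List.take (k + 1) s) = [s.getD k 'a'] := by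
              rw [List.drop_take, pvDropCons s k hki]
              simp
            have h2 : k - (List.take (k + 1) s).length = 0 := by simp; omega
            rw [h1, h2]
            simp
          rw [ih _ _ hm hIrr', htk, hdk]
          simp only [List.foldl_cons]
          rw [pvPush s k hki (pvIrr_mono (by omega) hInv)]
      · -- no removable pair at (i, i+1): A advances i; B pushes s[i]
        have hIrr' : pvIrr s (i + 1 + 1) := by
          intro j hj hjl
          by_cases hcase : j + 1 < i + 1
          · exact hInv j hcase hjl
          · have : j = i := by omega
            subst this
            exact Bool.eq_false_iff.mpr hr
        have hunfold : pvLoopA (fuel + 1) s i = pvLoopA fuel s (i + 1) := by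
          rw [pvLoopA, if_pos h]
          split
          next a' b' hx' hy' =>
            rw [hx] at hx'
            rw [hy] at hy'
            cases hx'
            cases hy'
            rw [if_neg hr]
          next hcatch =>
            exact (hcatch _ _ hx hy).elim
        have hm : 2 * s.length - (i + 1) < fuel := by omega
        rw [hunfold, ih _ _ hm hIrr', pvDropCons s i hi]
        simp only [List.foldl_cons]
        rw [pvPush s i hi hInv]
    · -- loop exit: i ≥ len - 1; at most one character of s is left to push
      rw [pvLoopA, if_neg h]
      by_cases hle : s.length ≤ i
      · rw [List.take_of_length_le hle, List.drop_of_length_le hle]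
        simp
      · have hi : i < s.length := by omega
        have hieq : i + 1 = s.length := by omega
        rw [pvDropCons s i hi]
        have hnil : s.drop (i + 1) = [] := List.drop_of_length_le (by omega)
        rw [hnil]
        simp only [List.foldl_cons, List.foldl_nil]
        rw [pvPush s i hi hInv, hieq, List.take_length, List.reverse_reverse]

theorem resultingString_spec : Claim_equal_resultingString := by
  intro s _
  unfold Spec_resultingString resultingString resultingString_alt
  rw [pvKey (2 * s.toList.length + 1) s.toList 0 (by omega) (fun j hj _ => by omega)]
  simp
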